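-- pv_equiv track=rewrite | github.com/rapidcow/perspective | src/psp/serializers/text.py | _join_tokens
-- ===== SOURCE A (Python) =====
-- def _join_tokens(tokens, wordchars):
--     buffer = []
--     was_word = False
--     for token in tokens:
--         is_word = token[:1] in wordchars
--         if not is_word and was_word:
--             buffer.pop()
--         buffer.append(token)
--         if is_word:
--             buffer.append(' ')
--         was_word = is_word
--     if was_word:
--         buffer.pop()
--     return ''.join(buffer)
-- ===== SOURCE B (Python) =====
-- def _join_tokens(tokens, wordchars):
--     # Group the token stream into maximal runs of equal word-ness, join each
--     # word run with a single space and each non-word run with '', concatenate.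
--     pieces = []
--     i = 0
--     n = len(tokens)
--     while i < n:
--         k = tokens[i][:1] in wordchars
--         j = i + 1
--         while j < n and (tokens[j][:1] in wordchars) == k:
--             j += 1
--         pieces.append((' ' if k else '').join(tokens[i:j]))
--         i = j
--     return ''.join(pieces)
-- ===== Notes on version B (the rewrite author's own statement) =====
-- stated objective: alternative
-- what changed: B partitions the token stream into maximal runs of word / non-word tokens and joins each run with ' ' or '' respectively, instead of A's eager append-a-space-then-pop-it-back buffer maintenance.
import Mathlib
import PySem

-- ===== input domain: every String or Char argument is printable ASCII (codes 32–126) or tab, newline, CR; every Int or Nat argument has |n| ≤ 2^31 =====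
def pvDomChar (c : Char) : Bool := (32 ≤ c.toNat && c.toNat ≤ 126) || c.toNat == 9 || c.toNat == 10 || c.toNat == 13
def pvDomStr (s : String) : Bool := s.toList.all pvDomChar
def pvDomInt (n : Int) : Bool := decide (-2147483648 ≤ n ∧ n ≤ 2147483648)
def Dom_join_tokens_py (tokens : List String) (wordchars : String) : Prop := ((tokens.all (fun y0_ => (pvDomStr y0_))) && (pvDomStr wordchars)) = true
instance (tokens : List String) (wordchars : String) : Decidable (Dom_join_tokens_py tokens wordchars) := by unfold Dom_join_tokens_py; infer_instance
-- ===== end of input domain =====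

-- B groups the tokens into maximal runs of word / non-word tokens and joins each
-- run with ' ' / '' (alternative decomposition; same cost as A).

-- ===== PORT A =====
-- token[:1] in wordchars  (shared by both Pythons verbatim)
def pvIsWord (wordchars token : String) : Bool :=
  PySem.Str.isIn (PySem.Str.slice token (some 0) (some 1)) wordchars

-- one iteration of A's for-loop over the state (buffer, was_word);
-- buffer.pop() is ported as dropLast, exact here: it only runs when
-- was_word = true, and then the buffer is nonempty (it ends with ' ').
def pvStepA (wordchars : String) (st : List String × Bool) (token : String) :
    List String × Bool :=
  let is_word := pvIsWord wordchars token
  let buffer := if !is_word && st.2 then st.1.dropLast else st.1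
  let buffer := buffer ++ [token]
  let buffer := if is_word then buffer ++ [" "] else buffer
  (buffer, is_word)

def join_tokens_py (tokens : List String) (wordchars : String) : String :=
  let st := tokens.foldl (pvStepA wordchars) ([], false)
  let buffer := if st.2 then st.1.dropLast else st.1
  PySem.Str.join "" buffer

-- ===== PORT B =====
-- B's outer while-loop: peel off one maximal run of equal word-ness at a time,
-- join it with ' ' (word run) or '' (non-word run).
def pvJoinRuns (wordchars : String) : List String → List String
  | [] => []
  | t :: ts =>
    let k := pvIsWord wordchars t
    let run := ts.takeWhile (fun u => pvIsWord wordchars u == k)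
    let rest := ts.dropWhile (fun u => pvIsWord wordchars u == k)
    PySem.Str.join (if k then " " else "") (t :: run) :: pvJoinRuns wordchars rest
termination_by ts => ts.length
decreasing_by
  have := List.length_dropWhile_le (fun u => pvIsWord wordchars u == k) ts
  simpa using Nat.lt_succ_of_le this

def join_tokens_py_alt (tokens : List String) (wordchars : String) : String :=
  PySem.Str.join "" (pvJoinRuns wordchars tokens)

-- ===== PRECONDITION & SPEC =====
def Spec_join_tokens_py (tokens : List String) (wordchars : String) (out : String) : Prop := out = join_tokens_py_alt tokens wordchars
instance (tokens : List String) (wordchars : String) (out : String) : Decidable (Spec_join_tokens_py tokens wordchars out) := by unfold Spec_join_tokens_py; infer_instance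

-- ===== CLAIM (what is proved, stated in full; the proofs are below) =====
def Claim_equal_join_tokens_py : Prop := ∀ (tokens : List String) (wordchars : String), Dom_join_tokens_py tokens wordchars → Spec_join_tokens_py tokens wordchars (join_tokens_py tokens wordchars)

-- ===== LEMMAS AND PROOFS =====

-- the common specification: characters produced by the remaining tokens,
-- given whether the previous token was a word
def pvRest (wordchars : String) : List String → Bool → List Char
  | [], _ => []
  | t :: ts, w =>
    (if pvIsWord wordchars t && w then [' '] else []) ++ t.toList
      ++ pvRest wordchars ts (pvIsWord wordchars t)

theorem pvCharsJoin_nil (l : List (List Char)) :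
    PySem.Chars.join [] l = l.flatten := by
  induction l with
  | nil => simp [PySem.Chars.join_nil]
  | cons p rest ih =>
    cases rest with
    | nil => simp [PySem.Chars.join_singleton]
    | cons q r => rw [PySem.Chars.join_cons_cons, ih]; simp

theorem pvJoin_nil_eq_flatten (parts : List String) :
    (PySem.Str.join "" parts).toList = (parts.map String.toList).flatten := by
  rw [PySem.Str.toList_join]
  have h : ("" : String).toList = [] := rfl
  rw [h, pvCharsJoin_nil]

theorem pvCharsJoin_cons (sep p : List Char) (l : List (List Char)) :
    PySem.Chars.join sep (p :: l) = p ++ (l.map (fun q => sep ++ q)).flatten := by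
  induction l generalizing p with
  | nil => simp [PySem.Chars.join_singleton]
  | cons q r ih => rw [PySem.Chars.join_cons_cons, ih q]; simp

theorem pvJoin_cons_eq (sep : String) (t : String) (run : List String) :
    (PySem.Str.join sep (t :: run)).toList
      = t.toList ++ (run.map (fun u => sep.toList ++ u.toList)).flatten := by
  rw [PySem.Str.toList_join, List.map_cons, pvCharsJoin_cons, List.map_map]
  rfl

-- pvRest's characters for a state (buffer, was_word) as A's loop keeps it
def pvChars (st : List String × Bool) : List Char :=
  (((if st.2 then st.1.dropLast else st.1).map String.toList)).flatten

theorem pvStepA_inv (wordchars : String) (ts : List String) :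
    ∀ buf (was : Bool), (was = true → ∃ b, buf = b ++ [" "]) →
      pvChars (ts.foldl (pvStepA wordchars) (buf, was))
        = pvChars (buf, was) ++ pvRest wordchars ts was := by
  induction ts with
  | nil => intro buf was _; simp [pvRest]
  | cons t ts ih =>
    intro buf was hinv
    rw [List.foldl_cons]
    have hstep : pvStepA wordchars (buf, was) t =
        ((if !(pvIsWord wordchars t) && was then buf.dropLast else buf) ++ [t]
           ++ (if pvIsWord wordchars t then [" "] else []), pvIsWord wordchars t) := by
      simp only [pvStepA]
      cases h : pvIsWord wordchars t <;> simp [h]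
    rw [hstep]
    have hinv' : pvIsWord wordchars t = true →
        ∃ b, (if !(pvIsWord wordchars t) && was then buf.dropLast else buf) ++ [t]
               ++ (if pvIsWord wordchars t then [" "] else []) = b ++ [" "] := by
      intro hk
      exact ⟨(if !(pvIsWord wordchars t) && was then buf.dropLast else buf) ++ [t],
        by simp [hk]⟩
    rw [ih _ _ hinv']
    rw [pvRest]
    cases hk : pvIsWord wordchars t with
    | true =>
      cases hw : was with
      | true =>
        obtain ⟨b, hb⟩ := hinv hw
        subst hb
        simp [pvChars, hk, hw]
      | false =>
        simp [pvChars, hk, hw]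
    | false =>
      cases hw : was with
      | true =>
        obtain ⟨b, hb⟩ := hinv hw
        subst hb
        simp [pvChars, hk, hw]
      | false =>
        simp [pvChars, hk, hw]

theorem pvA_chars (tokens : List String) (wordchars : String) :
    (join_tokens_py tokens wordchars).toList = pvRest wordchars tokens false := by
  unfold join_tokens_py
  rw [pvJoin_nil_eq_flatten]
  have := pvStepA_inv wordchars tokens [] false (by intro h; cases h)
  simpa [pvChars] using this

-- a run of tokens all of word-ness k contributes sep-prefixed pieces
theorem pvRest_run (wordchars : String) (run rest : List String) (k : Bool)
    (hrun : ∀ u ∈ run, pvIsWord wordchars u = k) :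
    pvRest wordchars (run ++ rest) k
      = (run.map (fun u => (if k then [' '] else []) ++ u.toList)).flatten
          ++ pvRest wordchars rest k := by
  induction run with
  | nil => simp
  | cons u run ih =>
    have hu : pvIsWord wordchars u = k := hrun u (by simp)
    rw [List.cons_append, pvRest, hu, ih (fun v hv => hrun v (by simp [hv]))]
    cases k <;> simp

-- the carried state is irrelevant when the next token is not a word of the same run
theorem pvRest_state (wordchars : String) (rest : List String) (k : Bool)
    (h : ∀ t ts, rest = t :: ts → ¬ (k = true ∧ pvIsWord wordchars t = true)) :
    pvRest wordchars rest k = pvRest wordchars rest false := by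
  cases rest with
  | nil => rfl
  | cons t ts =>
    have := h t ts rfl
    rw [pvRest, pvRest]
    cases hk : k with
    | false => rfl
    | true =>
      cases ht : pvIsWord wordchars t with
      | true => exact absurd ⟨rfl, ht⟩ (hk ▸ this)
      | false => simp [ht]

theorem pvB_chars (wordchars : String) (ts : List String) :
    ((pvJoinRuns wordchars ts).map String.toList).flatten
      = pvRest wordchars ts false := by
  fun_induction pvJoinRuns wordchars ts with
  | case1 => simp [pvRest]
  | case2 t ts k run rest ihrest =>
    rw [List.map_cons, List.flatten_cons, ihrest]
    rw [pvJoin_cons_eq]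
    rw [pvRest]
    have hdeck : ts = run ++ rest := (List.takeWhile_append_dropWhile).symm
    have hrunk : ∀ u ∈ run, pvIsWord wordchars u = k := by
      intro u hu
      have := List.mem_takeWhile_imp hu
      simpa using this
    have hrest : ∀ u us, rest = u :: us → ¬ (k = true ∧ pvIsWord wordchars u = true) := by
      intro u us hr hconj
      have hhead : (fun v => pvIsWord wordchars v == k) u = false := by
        have hthis := List.head?_dropWhile_not (fun v => pvIsWord wordchars v == k) ts
        have hr' : List.dropWhile (fun v => pvIsWord wordchars v == k) ts = u :: us := hr
        rw [hr'] at hthis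
        simpa using hthis
      simp only [hconj.2, hconj.1] at hhead
      simp at hhead
    have hsep : (if k then (" " : String) else "").toList = (if k then [' '] else []) := by
      cases k <;> rfl
    rw [hdeck, pvRest_run wordchars run rest k hrunk, pvRest_state wordchars rest k hrest]
    have hk : pvIsWord wordchars t = k := rfl
    rw [hk, hsep]
    cases k <;> simp

-- ===== VERDICT (by name: the statement is the Claim_ definition above) =====
theorem join_tokens_py_spec : Claim_equal_join_tokens_py := by
  intro tokens wordchars _
  unfold Spec_join_tokens_py
  rw [← String.toList_inj, pvA_chars]
  unfold join_tokens_py_alt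
  rw [pvJoin_nil_eq_flatten, pvB_chars]
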